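-- pv_equiv track=rewrite | github.com/RihabDahdouh/Projet-Analyseur-des-proverbes | Checker (2).py | suggest_similar_proverb
-- ===== SOURCE A (Python) =====
-- def suggest_similar_proverb(input_proverb):
--     known_proverbs = [
--         'das glück ist mit den mutigen',
--         'la fortuna aiuta gli audaci',
--         'fortune favors the bold',
--         'la fortune sourit aux audacieux',
--         'z3em takl l7em',
--         'halte deine freunde nah bei dir und deine feinde noch näher',
--         'tieni i tuoi amici vicini e i tuoi nemici ancora più vicini',
--         'keep your friends close, and your enemies closer',
--         'garde tes amis près de toi et tes ennemis encore plus près',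
--         '3achr l3do ktr mn sdi9',
--         'ein vater ist ein von der natur bereitgestellter bankier',
--         'un padre è un banchiere fornito dalla natura',
--         'a father is a banker provided by nature',
--         'un père est un banquier fourni par la nature',
--         'li 3ndo bah ghnah lah',
--         'wann immer ein vogel fliegt und aufsteigt, wird er sicher fallen',
--         'ogni volta che un uccello vola e si alza, certamente cadrà',
--         'whenever a bird flies and rises, it shall surely fall',
--         'chaque fois qu\'un oiseau vole et s\'élève, il tombera sûrement',
--         'ma tara tayron wa irtafa3 illa kama tara wa9a3',
--         'der frühe vogel fängt den wurm',
--         'il mattino ha l\'oro in bocca',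
--         'the early bird catches the worm',
--         'le monde appartient à ceux qui se lèvent tôt',
--         'lfya9 bkri b dheb mchri',
--         'zähle deine hühner nicht, bevor sie geschlüpft sind',
--         'non contare i tuoi polli prima che siano nati',
--         'don\'t count your chickens before they hatch',
--         'ne compte pas tes poulets avant qu\'ils n\'aient éclos',
--         'li zreb 3la rz9o ndem',
--         'zwei fehler ergeben noch lange nicht einen richtigen',
--         'due torti non fanno una ragione',
--         'two wrongs don\'t make a right',
--         'deux torts ne font pas un droit',
--         'matredsh l3ib bl3ib',
--         'jede wolke hat einen silbernen rand',
--         'ogni nuvola ha un suo lato positivo',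
--         'every cloud has a silver lining',
--         'chaque nuage a une lueur d\'espoir',
--         'makitsd bab ta kit7lo biban',
--         'schönheit ohne anmut ist wie ein haken ohne köder',
--         'la bellezza senza grazia è come un amo senza esca',
--         'beauty without grace is like a hook without bait',
--         'la beauté sans grâce, c\'est comme un crochet sans appât',
--         'khellik rwich9a tb9ay 3wich9a',
--         'zweifel ist der anfang der weisheit',
--         'il dubbio è l\'inizio della saggezza',
--         'doubt is the beginning of wisdom',
--         'le doute est le commencement de la sagesse',
--         'la 7kma bla chk',
--         'übung macht den meister',
--         'la pratica rende perfetti',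
--         'practice makes perfect',
--         'a force de forger on devient forgeron',
--         'Talta ma falta',
--         'der glaube kann berge versetzen',
--         'la fede può muovere le montagne',
--         'faith can move mountains',
--         'la foi peut déplacer des montagnes',
--         'l2iman y7rk jbal'
--     ]
--
--     input_tokens = input_proverb.split()
--     score = []
--
--     for proverb in known_proverbs:
--         proverb_tokens = proverb.split()
--         count = sum(1 for token in input_tokens if token in proverb_tokens)
--         score.append(count)
--
--     max_score = max(score)
--     if max(score) <= 1:
--         return None
--     return known_proverbs[score.index(max_score)]
-- ===== SOURCE B (Python) =====
-- # B: inverted index token -> proverb indices, built once at module level; scoring bumps an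
-- # integer counts array per input token's postings instead of scanning every proverb's tokens.
-- _KNOWN_PROVERBS = [
--         'das glück ist mit den mutigen',
--         'la fortuna aiuta gli audaci',
--         'fortune favors the bold',
--         'la fortune sourit aux audacieux',
--         'z3em takl l7em',
--         'halte deine freunde nah bei dir und deine feinde noch näher',
--         'tieni i tuoi amici vicini e i tuoi nemici ancora più vicini',
--         'keep your friends close, and your enemies closer',
--         'garde tes amis près de toi et tes ennemis encore plus près',
--         '3achr l3do ktr mn sdi9',
--         'ein vater ist ein von der natur bereitgestellter bankier',
--         'un padre è un banchiere fornito dalla natura',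
--         'a father is a banker provided by nature',
--         'un père est un banquier fourni par la nature',
--         'li 3ndo bah ghnah lah',
--         'wann immer ein vogel fliegt und aufsteigt, wird er sicher fallen',
--         'ogni volta che un uccello vola e si alza, certamente cadrà',
--         'whenever a bird flies and rises, it shall surely fall',
--         'chaque fois qu\'un oiseau vole et s\'élève, il tombera sûrement',
--         'ma tara tayron wa irtafa3 illa kama tara wa9a3',
--         'der frühe vogel fängt den wurm',
--         'il mattino ha l\'oro in bocca',
--         'the early bird catches the worm',
--         'le monde appartient à ceux qui se lèvent tôt',
--         'lfya9 bkri b dheb mchri',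
--         'zähle deine hühner nicht, bevor sie geschlüpft sind',
--         'non contare i tuoi polli prima che siano nati',
--         'don\'t count your chickens before they hatch',
--         'ne compte pas tes poulets avant qu\'ils n\'aient éclos',
--         'li zreb 3la rz9o ndem',
--         'zwei fehler ergeben noch lange nicht einen richtigen',
--         'due torti non fanno una ragione',
--         'two wrongs don\'t make a right',
--         'deux torts ne font pas un droit',
--         'matredsh l3ib bl3ib',
--         'jede wolke hat einen silbernen rand',
--         'ogni nuvola ha un suo lato positivo',
--         'every cloud has a silver lining',
--         'chaque nuage a une lueur d\'espoir',
--         'makitsd bab ta kit7lo biban',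
--         'schönheit ohne anmut ist wie ein haken ohne köder',
--         'la bellezza senza grazia è come un amo senza esca',
--         'beauty without grace is like a hook without bait',
--         'la beauté sans grâce, c\'est comme un crochet sans appât',
--         'khellik rwich9a tb9ay 3wich9a',
--         'zweifel ist der anfang der weisheit',
--         'il dubbio è l\'inizio della saggezza',
--         'doubt is the beginning of wisdom',
--         'le doute est le commencement de la sagesse',
--         'la 7kma bla chk',
--         'übung macht den meister',
--         'la pratica rende perfetti',
--         'practice makes perfect',
--         'a force de forger on devient forgeron',
--         'Talta ma falta',
--         'der glaube kann berge versetzen',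
--         'la fede può muovere le montagne',
--         'faith can move mountains',
--         'la foi peut déplacer des montagnes',
--         'l2iman y7rk jbal'
--     ]
--
-- _INDEX = {}
-- for _i, _p in enumerate(_KNOWN_PROVERBS):
--     for _t in _p.split():
--         _postings = _INDEX.get(_t, [])
--         if _i not in _postings:
--             _INDEX[_t] = _postings + [_i]
--
--
-- def suggest_similar_proverb(input_proverb):
--     counts = [0] * len(_KNOWN_PROVERBS)
--     for token in input_proverb.split():
--         for i in _INDEX.get(token, []):
--             counts[i] += 1
--     best_count = -1
--     best_index = 0
--     for i, c in enumerate(counts):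
--         if c > best_count:
--             best_count = c
--             best_index = i
--     if best_count <= 1:
--         return None
--     return _KNOWN_PROVERBS[best_index]
-- ===== Notes on version B (the rewrite author's own statement) =====
-- stated objective: alternative
-- what changed: B replaces A's per-proverb scan (for each proverb, count input tokens contained in its split) by an inverted index token->proverb-indices built once at module level; scoring is one pass over the input tokens bumping an integer counts array via the postings, followed by a first-argmax scan, so the nested membership scan over every proverb's tokens disappears (per call O(m*p+n) instead of O(m*T); the constant workload here is too small for a timing run to resolve).
import Mathlib
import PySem

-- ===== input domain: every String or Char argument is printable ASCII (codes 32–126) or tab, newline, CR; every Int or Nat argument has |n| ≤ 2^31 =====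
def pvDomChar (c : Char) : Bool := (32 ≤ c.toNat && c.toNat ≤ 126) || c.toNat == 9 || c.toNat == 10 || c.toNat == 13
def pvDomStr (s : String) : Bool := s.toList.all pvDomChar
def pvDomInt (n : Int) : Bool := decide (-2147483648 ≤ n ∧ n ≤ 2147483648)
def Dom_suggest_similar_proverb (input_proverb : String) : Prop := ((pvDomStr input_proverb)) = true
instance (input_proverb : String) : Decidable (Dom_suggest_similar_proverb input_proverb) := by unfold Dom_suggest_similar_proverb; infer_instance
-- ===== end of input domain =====

-- B replaces A's per-proverb scan by an inverted index (token -> proverb indices) plus a counts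
-- array bumped per input token's postings, then a first-argmax scan — objective: alternative.

-- ===== PORT A =====
-- the module-level constant list of known proverbs (shared verbatim by both ports)
def pvKnownProverbs : List String := [
  "das glück ist mit den mutigen",
  "la fortuna aiuta gli audaci",
  "fortune favors the bold",
  "la fortune sourit aux audacieux",
  "z3em takl l7em",
  "halte deine freunde nah bei dir und deine feinde noch näher",
  "tieni i tuoi amici vicini e i tuoi nemici ancora più vicini",
  "keep your friends close, and your enemies closer",
  "garde tes amis près de toi et tes ennemis encore plus près",
  "3achr l3do ktr mn sdi9",
  "ein vater ist ein von der natur bereitgestellter bankier",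
  "un padre è un banchiere fornito dalla natura",
  "a father is a banker provided by nature",
  "un père est un banquier fourni par la nature",
  "li 3ndo bah ghnah lah",
  "wann immer ein vogel fliegt und aufsteigt, wird er sicher fallen",
  "ogni volta che un uccello vola e si alza, certamente cadrà",
  "whenever a bird flies and rises, it shall surely fall",
  "chaque fois qu'un oiseau vole et s'élève, il tombera sûrement",
  "ma tara tayron wa irtafa3 illa kama tara wa9a3",
  "der frühe vogel fängt den wurm",
  "il mattino ha l'oro in bocca",
  "the early bird catches the worm",
  "le monde appartient à ceux qui se lèvent tôt",
  "lfya9 bkri b dheb mchri",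
  "zähle deine hühner nicht, bevor sie geschlüpft sind",
  "non contare i tuoi polli prima che siano nati",
  "don't count your chickens before they hatch",
  "ne compte pas tes poulets avant qu'ils n'aient éclos",
  "li zreb 3la rz9o ndem",
  "zwei fehler ergeben noch lange nicht einen richtigen",
  "due torti non fanno una ragione",
  "two wrongs don't make a right",
  "deux torts ne font pas un droit",
  "matredsh l3ib bl3ib",
  "jede wolke hat einen silbernen rand",
  "ogni nuvola ha un suo lato positivo",
  "every cloud has a silver lining",
  "chaque nuage a une lueur d'espoir",
  "makitsd bab ta kit7lo biban",
  "schönheit ohne anmut ist wie ein haken ohne köder",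
  "la bellezza senza grazia è come un amo senza esca",
  "beauty without grace is like a hook without bait",
  "la beauté sans grâce, c'est comme un crochet sans appât",
  "khellik rwich9a tb9ay 3wich9a",
  "zweifel ist der anfang der weisheit",
  "il dubbio è l'inizio della saggezza",
  "doubt is the beginning of wisdom",
  "le doute est le commencement de la sagesse",
  "la 7kma bla chk",
  "übung macht den meister",
  "la pratica rende perfetti",
  "practice makes perfect",
  "a force de forger on devient forgeron",
  "Talta ma falta",
  "der glaube kann berge versetzen",
  "la fede può muovere le montagne",
  "faith can move mountains",
  "la foi peut déplacer des montagnes",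
  "l2iman y7rk jbal"]

-- count = sum(1 for token in input_tokens if token in proverb_tokens)  (A's inner loop)
def pvCount (input_tokens proverb_tokens : List String) : Int :=
  input_tokens.foldl (fun acc token => if proverb_tokens.contains token then acc + 1 else acc) 0

def suggest_similar_proverb (input_proverb : String) : Option String :=
  let input_tokens := PySem.Str.split₀ input_proverb
  let score := pvKnownProverbs.foldl (fun score proverb =>
      let proverb_tokens := PySem.Str.split₀ proverb
      score ++ [pvCount input_tokens proverb_tokens]) []
  match PySem.List.max? score (fun x => x) with   -- max(score); the list is nonempty, so never none
  | none => none
  | some max_score =>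
    if max_score ≤ 1 then none
    else match PySem.List.index? score max_score with  -- score.index(max_score); always found
      | none => none
      | some i => PySem.List.pyGet? pvKnownProverbs (i : Int)

-- ===== PORT B =====
-- inner statement of the index-building loop:
--   postings = index.get(token, []);  if i not in postings: index[token] = postings + [i]
def pvIndexStep (i : Int) (d : PySem.Dict String (List Int)) (token : String) :
    PySem.Dict String (List Int) :=
  let postings := d.getD token []
  if postings.contains i then d else d.insert token (postings ++ [i])

-- _INDEX, built once at module level by the double loop over enumerate(_KNOWN_PROVERBS)
def pvIndex : PySem.Dict String (List Int) :=
  (PySem.List.enumerate pvKnownProverbs 0).foldl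
    (fun d p => (PySem.Str.split₀ p.2).foldl (pvIndexStep p.1) d) PySem.Dict.empty

def suggest_similar_proverb_alt (input_proverb : String) : Option String :=
  -- counts[i] += 1 ported with List.set; every posting i is a valid nonnegative index
  let counts := (PySem.Str.split₀ input_proverb).foldl
    (fun counts token => (pvIndex.getD token []).foldl
        (fun (counts : List Int) i => counts.set i.toNat (counts.getD i.toNat 0 + 1)) counts)
    (List.replicate pvKnownProverbs.length 0)
  let st := (PySem.List.enumerate counts 0).foldl
    (fun (st : Int × Int) p => if p.2 > st.1 then (p.2, p.1) else st) (-1, 0)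
  if st.1 ≤ 1 then none
  else PySem.List.pyGet? pvKnownProverbs st.2   -- known_proverbs[best_index]; always in range

-- ===== PRECONDITION & SPEC =====
def Spec_suggest_similar_proverb (input_proverb : String) (out : Option String) : Prop := out = suggest_similar_proverb_alt input_proverb
instance (input_proverb : String) (out : Option String) : Decidable (Spec_suggest_similar_proverb input_proverb out) := by unfold Spec_suggest_similar_proverb; infer_instance

-- ===== CLAIM (what is proved, stated in full; the proofs are below) =====
def Claim_equal_suggest_similar_proverb : Prop := ∀ (input_proverb : String), Dom_suggest_similar_proverb input_proverb → Spec_suggest_similar_proverb input_proverb (suggest_similar_proverb input_proverb)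

-- ===== LEMMAS AND PROOFS =====

-- pvCount is nonnegative
theorem pvCount_nonneg (it pt : List String) : 0 ≤ pvCount it pt := by
  have h := PySem.List.foldl_if_add_one (fun token => pt.contains token) it (0 : Int)
  unfold pvCount
  rw [h]
  positivity

-- invariant of the inner index-building fold (one proverb, index i)
theorem pvIndex_inner (i : Int) (ts : List String) :
    ∀ (d : PySem.Dict String (List Int)), (∀ u, (d.getD u ([] : List Int)).Nodup) →
      (∀ u j, j ∈ (ts.foldl (pvIndexStep i) d).getD u ([] : List Int) ↔
        j ∈ d.getD u ([] : List Int) ∨ (j = i ∧ u ∈ ts))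
      ∧ (∀ u, ((ts.foldl (pvIndexStep i) d).getD u ([] : List Int)).Nodup) := by
  induction ts with
  | nil => intro d hnd; exact ⟨fun u j => by simp, hnd⟩
  | cons t ts ih =>
    intro d hnd
    simp only [List.foldl_cons]
    have hstep : ∀ u j, j ∈ (pvIndexStep i d t).getD u ([] : List Int) ↔
        j ∈ d.getD u ([] : List Int) ∨ (j = i ∧ u = t) := by
      intro u j
      unfold pvIndexStep
      by_cases hc : (d.getD t ([] : List Int)).contains i
      · rw [if_pos hc]
        constructor
        · exact fun h => Or.inl h
        · rintro (h | ⟨rfl, rfl⟩)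
          · exact h
          · simpa using hc
      · rw [if_neg hc, PySem.Dict.getD_insert]
        by_cases hu : u = t
        · subst hu; simp
        · simp [hu]
    have hstepnd : ∀ u, ((pvIndexStep i d t).getD u ([] : List Int)).Nodup := by
      intro u
      unfold pvIndexStep
      by_cases hc : (d.getD t ([] : List Int)).contains i
      · rw [if_pos hc]; exact hnd u
      · rw [if_neg hc, PySem.Dict.getD_insert]
        by_cases hu : u = t
        · rw [if_pos hu]
          have hni : i ∉ d.getD t ([] : List Int) := by simpa using hc
          have hdisj : List.Disjoint (d.getD t ([] : List Int)) [i] := by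
            intro a ha hb
            rw [List.mem_singleton] at hb
            exact hni (hb ▸ ha)
          exact List.Nodup.append (hnd t) (List.nodup_singleton i) hdisj
        · rw [if_neg hu]; exact hnd u
    obtain ⟨ihmem, ihnd⟩ := ih (pvIndexStep i d t) hstepnd
    refine ⟨fun u j => ?_, ihnd⟩
    rw [ihmem u j, hstep u j]
    constructor
    · rintro ((h | ⟨rfl, rfl⟩) | ⟨rfl, hm⟩)
      · exact Or.inl h
      · exact Or.inr ⟨rfl, by simp⟩
      · exact Or.inr ⟨rfl, by simp [hm]⟩
    · rintro (h | ⟨rfl, hm⟩)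
      · exact Or.inl (Or.inl h)
      · rcases List.mem_cons.mp hm with h | h
        · exact Or.inl (Or.inr ⟨rfl, h⟩)
        · exact Or.inr ⟨rfl, h⟩

-- invariant of the outer index-building fold
theorem pvIndex_outer (ps : List (Int × String)) :
    ∀ (d : PySem.Dict String (List Int)), (∀ u, (d.getD u ([] : List Int)).Nodup) →
      (∀ u j, j ∈ (ps.foldl (fun d p => (PySem.Str.split₀ p.2).foldl (pvIndexStep p.1) d) d).getD u ([] : List Int) ↔
        j ∈ d.getD u ([] : List Int) ∨ ∃ p ∈ ps, j = p.1 ∧ u ∈ PySem.Str.split₀ p.2)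
      ∧ (∀ u, ((ps.foldl (fun d p => (PySem.Str.split₀ p.2).foldl (pvIndexStep p.1) d) d).getD u ([] : List Int)).Nodup) := by
  induction ps with
  | nil => intro d hnd; exact ⟨fun u j => by simp, hnd⟩
  | cons p ps ih =>
    intro d hnd
    simp only [List.foldl_cons]
    obtain ⟨hmem1, hnd1⟩ := pvIndex_inner p.1 (PySem.Str.split₀ p.2) d hnd
    obtain ⟨ihmem, ihnd⟩ := ih _ hnd1
    refine ⟨fun u j => ?_, ihnd⟩
    rw [ihmem u j, hmem1 u j]
    constructor
    · rintro ((h | ⟨rfl, hm⟩) | ⟨q, hq, rfl, hm⟩)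
      · exact Or.inl h
      · exact Or.inr ⟨p, by simp, rfl, hm⟩
      · exact Or.inr ⟨q, by simp [hq], rfl, hm⟩
    · rintro (h | ⟨q, hq, rfl, hm⟩)
      · exact Or.inl (Or.inl h)
      · rcases List.mem_cons.mp hq with rfl | hq
        · exact Or.inl (Or.inr ⟨rfl, hm⟩)
        · exact Or.inr ⟨q, hq, rfl, hm⟩

-- membership in a postings list of pvIndex
theorem mem_pvIndex (u : String) (j : Int) :
    j ∈ pvIndex.getD u ([] : List Int) ↔
      ∃ (k : Nat) (h : k < pvKnownProverbs.length), j = (k : Int) ∧ u ∈ PySem.Str.split₀ (pvKnownProverbs[k]) := by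
  obtain ⟨hmem, _⟩ := pvIndex_outer (PySem.List.enumerate pvKnownProverbs 0) PySem.Dict.empty (by simp [pysem])
  unfold pvIndex
  rw [hmem u j]
  simp only [PySem.Dict.getD_empty, List.not_mem_nil, false_or]
  constructor
  · rintro ⟨p, hp, rfl, hm⟩
    rw [PySem.List.mem_enumerate_iff] at hp
    obtain ⟨k, hk, rfl⟩ := hp
    exact ⟨k, hk, by simp, hm⟩
  · rintro ⟨k, hk, rfl, hm⟩
    exact ⟨((k : Int), pvKnownProverbs[k]), by rw [PySem.List.mem_enumerate_iff]; exact ⟨k, hk, by simp⟩, rfl, hm⟩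

theorem nodup_pvIndex (u : String) : (pvIndex.getD u ([] : List Int)).Nodup :=
  (pvIndex_outer (PySem.List.enumerate pvKnownProverbs 0) PySem.Dict.empty (by simp [pysem])).2 u

-- the inner counts loop preserves length
theorem counts_inner_len (L : List Int) :
    ∀ (c : List Int), (L.foldl (fun (c : List Int) i => c.set i.toNat (c.getD i.toNat 0 + 1)) c).length = c.length := by
  induction L with
  | nil => intro c; rfl
  | cons i L ih => intro c; rw [List.foldl_cons, ih, List.length_set]

-- one Nodup postings list of nonnegative indices bumps position j by (1 if j in it else 0)
theorem counts_inner_inc (L : List Int) (hnd : L.Nodup) (h0 : ∀ i ∈ L, 0 ≤ i) :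
    ∀ (c : List Int) (j : Nat), j < c.length →
      (L.foldl (fun (c : List Int) i => c.set i.toNat (c.getD i.toNat 0 + 1)) c).getD j 0
        = c.getD j 0 + (if (j : Int) ∈ L then 1 else 0) := by
  induction L with
  | nil => intro c j hj; simp
  | cons i L ih =>
    intro c j hj
    simp only [List.foldl_cons]
    have hnd' := hnd.of_cons
    have hi0 : 0 ≤ i := h0 i (by simp)
    have h0' : ∀ x ∈ L, 0 ≤ x := fun x hx => h0 x (by simp [hx])
    rw [ih hnd' h0' _ j (by simpa using hj)]
    by_cases hji : (j : Int) = i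
    · have hij : i.toNat = j := by omega
      have hjL : (j : Int) ∉ L := by rw [hji]; exact (List.nodup_cons.mp hnd).1
      subst hij
      simp only [List.getD_eq_getElem?_getD, List.getElem?_set_self (by omega : i.toNat < c.length)]
      simp only [Option.getD_some]
      have hmem : i ∈ i :: L := by simp
      rw [if_neg hjL, if_pos (by rw [hji]; exact hmem)]
      omega
    · have hij : i.toNat ≠ j := by omega
      simp only [List.getD_eq_getElem?_getD]
      rw [List.getElem?_set_ne hij]
      simp [List.mem_cons, hji]

-- the whole counts loop: position j accumulates the number of input tokens whose postings contain j
theorem counts_spec (it : List String) :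
    ∀ (c : List Int) (j : Nat), j < c.length →
      (it.foldl (fun counts token => (pvIndex.getD token ([] : List Int)).foldl
          (fun (counts : List Int) i => counts.set i.toNat (counts.getD i.toNat 0 + 1)) counts) c).getD j 0
        = c.getD j 0 + ((it.countP (fun token => decide ((j : Int) ∈ pvIndex.getD token ([] : List Int)))) : Int) := by
  induction it with
  | nil => intro c j hj; simp
  | cons t it ih =>
    intro c j hj
    simp only [List.foldl_cons]
    have h0 : ∀ i ∈ pvIndex.getD t ([] : List Int), 0 ≤ i := by
      intro i hi
      obtain ⟨k, hk, rfl, _⟩ := (mem_pvIndex t i).mp hi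
      positivity
    have hlen : j < ((pvIndex.getD t ([] : List Int)).foldl
        (fun (counts : List Int) i => counts.set i.toNat (counts.getD i.toNat 0 + 1)) c).length := by
      rw [counts_inner_len]; exact hj
    rw [ih _ j hlen, counts_inner_inc _ (nodup_pvIndex t) h0 c j hj]
    rw [List.countP_cons]
    by_cases hm : (j : Int) ∈ pvIndex.getD t ([] : List Int) <;> simp [hm] <;> ring

-- the whole counts loop preserves length
theorem counts_len (it : List String) :
    ∀ (c : List Int),
      (it.foldl (fun counts token => (pvIndex.getD token ([] : List Int)).foldl
          (fun (counts : List Int) i => counts.set i.toNat (counts.getD i.toNat 0 + 1)) counts) c).length = c.length := by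
  induction it with
  | nil => intro c; rfl
  | cons t it ih => intro c; rw [List.foldl_cons, ih, counts_inner_len]

-- B's best-tracking fold over an enumerated list of scores lands on the running max and its first index
theorem enum_fold_spec (xs : List Int) :
    ∀ (k b j : Int),
      (PySem.List.enumerate xs k).foldl (fun (st : Int × Int) p => if p.2 > st.1 then (p.2, p.1) else st) (b, j)
        = if b < xs.foldl max b
          then (xs.foldl max b, k + (((PySem.List.index? xs (xs.foldl max b)).getD 0 : Nat) : Int))
          else (b, j) := by
  induction xs with
  | nil => intro k b j; simp
  | cons x xs ih =>
    intro k b j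
    rw [PySem.List.enumerate_cons]
    simp only [List.foldl_cons]
    by_cases hx : x > b
    · rw [if_pos hx, max_eq_right (le_of_lt hx), ih (k + 1) x k]
      have hxle : x ≤ xs.foldl max x := (PySem.List.le_foldl_max xs x).1
      rw [if_pos (by omega : b < xs.foldl max x)]
      by_cases hlt : x < xs.foldl max x
      · rw [if_pos hlt]
        have hmem : xs.foldl max x ∈ xs := by
          rcases PySem.List.foldl_max_mem xs x with h | h
          · omega
          · exact h
        obtain ⟨m, hm⟩ := Option.isSome_iff_exists.mp ((PySem.List.index?_isSome_iff _ _).mpr hmem)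
        rw [PySem.List.index?_cons_of_ne _ (by omega), hm]
        simp only [Option.map_some, Option.getD_some, Prod.mk.injEq]
        refine ⟨trivial, ?_⟩
        push_cast
        omega
      · rw [if_neg hlt]
        have hxM : x = xs.foldl max x := by omega
        rw [← hxM, PySem.List.index?_cons_self]
        simp
    · rw [if_neg hx, max_eq_left (by omega : x ≤ b), ih (k + 1) b j]
      by_cases hlt : b < xs.foldl max b
      · rw [if_pos hlt, if_pos hlt]
        have hmem : xs.foldl max b ∈ xs := by
          rcases PySem.List.foldl_max_mem xs b with h | h
          · omega
          · exact h
        obtain ⟨m, hm⟩ := Option.isSome_iff_exists.mp ((PySem.List.index?_isSome_iff _ _).mpr hmem)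
        rw [PySem.List.index?_cons_of_ne _ (by omega), hm]
        simp only [Option.map_some, Option.getD_some, Prod.mk.injEq]
        refine ⟨trivial, ?_⟩
        push_cast
        omega
      · rw [if_neg hlt, if_neg hlt]

-- A's max/index selection equals B's enumerate fold on the same nonempty score list
theorem sel_eq (ps : List String) (x : Int) (rest : List Int) (hx : 0 ≤ x) :
    (match PySem.List.max? (x :: rest) (fun y => y) with
     | none => none
     | some max_score =>
       if max_score ≤ 1 then none
       else match PySem.List.index? (x :: rest) max_score with
         | none => none
         | some i => PySem.List.pyGet? ps (i : Int))
    = (let st := (PySem.List.enumerate (x :: rest) 0).foldl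
          (fun (st : Int × Int) p => if p.2 > st.1 then (p.2, p.1) else st) (-1, 0)
       if st.1 ≤ 1 then none else PySem.List.pyGet? ps st.2) := by
  rw [PySem.List.max?_id_cons]
  have hM : (x :: rest).foldl max (-1) = rest.foldl max x := by
    simp [max_eq_right (by omega : (-1 : Int) ≤ x)]
  have hxle : x ≤ rest.foldl max x := (PySem.List.le_foldl_max rest x).1
  have hmem : rest.foldl max x ∈ x :: rest := by
    rcases PySem.List.foldl_max_mem rest x with h | h
    · rw [h]; simp
    · simp [h]
  have hsome : (PySem.List.index? (x :: rest) (rest.foldl max x)).isSome :=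
    (PySem.List.index?_isSome_iff _ _).mpr hmem
  obtain ⟨m, hm⟩ := Option.isSome_iff_exists.mp hsome
  rw [enum_fold_spec (x :: rest) 0 (-1) 0, hM,
    if_pos (show (-1 : Int) < rest.foldl max x by omega), hm]
  simp only [Option.getD_some]
  by_cases h1 : rest.foldl max x ≤ 1
  · rw [if_pos h1]
    simp [h1]
  · rw [if_neg h1]
    simp only [PySem.List.index?_eq_idxOf?] at hm
    simp [hm, h1]

-- ===== VERDICT (by name: the statement is the Claim_ definition above) =====
theorem suggest_similar_proverb_spec : Claim_equal_suggest_similar_proverb := by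
  intro s _
  unfold Spec_suggest_similar_proverb suggest_similar_proverb suggest_similar_proverb_alt
  simp only [PySem.List.foldl_append_singleton_eq_map, List.nil_append]
  -- the counts list B builds IS A's score list
  have hcounts :
      ((PySem.Str.split₀ s).foldl (fun counts token => (pvIndex.getD token ([] : List Int)).foldl
          (fun (counts : List Int) i => counts.set i.toNat (counts.getD i.toNat 0 + 1)) counts)
        (List.replicate pvKnownProverbs.length 0))
      = pvKnownProverbs.map (fun proverb => pvCount (PySem.Str.split₀ s) (PySem.Str.split₀ proverb)) := by
    apply List.ext_getElem
    · rw [counts_len]; simp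
    · intro j hj hj'
      have hjlen : j < pvKnownProverbs.length := by simpa using hj'
      have hlenrep : j < (List.replicate pvKnownProverbs.length (0 : Int)).length := by simpa using hjlen
      rw [← List.getD_eq_getElem _ 0 hj, counts_spec _ _ j hlenrep]
      rw [List.getD_eq_getElem _ 0 hlenrep]
      simp only [List.getElem_replicate, List.getElem_map, zero_add]
      have hP : ∀ token, (decide ((j : Int) ∈ pvIndex.getD token ([] : List Int)))
          = (PySem.Str.split₀ pvKnownProverbs[j]).contains token := by
        intro token
        rw [Bool.eq_iff_iff]
        simp only [decide_eq_true_eq, List.contains_iff_mem]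
        rw [mem_pvIndex]
        constructor
        · rintro ⟨k, hk, hkj, hmem⟩
          have : k = j := by omega
          subst this; exact hmem
        · intro hmem; exact ⟨j, hjlen, rfl, hmem⟩
      unfold pvCount
      rw [PySem.List.foldl_if_add_one]
      rw [List.countP_congr (fun token _ => by rw [hP token])]
      simp only [zero_add]
      rfl
  rw [hcounts]
  -- expose the head of the proverb list and apply the selection lemma
  obtain ⟨p, rest, hpr⟩ : ∃ p rest, pvKnownProverbs = p :: rest := ⟨_, _, rfl⟩
  rw [hpr, List.map_cons]
  exact sel_eq _ _ _ (pvCount_nonneg _ _)
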